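-- pv_equiv track=rewrite | github.com/jisc-services/oa-PubRouter-App | src/router/shared/models/note.py | calc_cat_from_compound_article_type
-- ===== SOURCE A (Python) =====
-- def calc_cat_from_compound_article_type(article_type, default="O"):
--     """
--     Calculate Category (resource type) code (1 to 3 chars) by analysing an article_type string containing
--     multiple values separated by '; ' (semicolon).
--     :param article_type: String of article types, separated by semicolon
--     :param default: String - Default category code
--     :return: String - Category code (1 to 3 chars)
--     """
--     # The ordering of this list is important...
--     first_pass = [
--         (["research-article", "abstract", "clinical trial", "methods-article", "journal-article"], "JAR"),
--         # Journal research article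
--         (["review", "review-article", "systematic-review", "systematic review", "product-review"], "JAV"),
--         # Journal review article
--         (["data-paper"], "JAD"),  # Journal data paper
--         (["correction", "erratum", "retraction", "published erratum", "retraction of publication",
--           "corrected and republished article"], "JAC"),  # Journal article corrigendum
--         (["article-commentary"], "VC"),  # Review commentary
--         (["brief-report", "case reports", "case-study"], "RR"),  # Research report
--         (["letter", "Letter", "reply"], "JL"),  # Journal letter
--         (["editorial", "Editorial"], "JE"),  # Journal editorial
--         (["meeting-report"], "RM"),  # Report memorandum
--         (["clinical trial protocol"], "RL"),  # Research Protocol report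
--         (["practice-and-policy", "practice guideline"], "RO"),  # Policy report
--         (["preprint", "article-preprint"], "P"),  # Preprint
--         (["monograph"], "B"),  # Book
--         (["book-chapter"], "BC"),  # Book chapter
--         (["book-review"], "VB"),  # Book review
--         (["report"], "R"),  # Report
--         (["technical-note"], "RT"),  # Technical report
--         (["proceedings"], "CP"),  # Conference proceedings
--         (["clinical conference"], "C"),  # Conference output
--     ]
--     # After forcing to lower case
--     second_pass = [
--         (["case-report"], "RR"),  # Research report
--         (["journal article", "article", ], "JAR"),  # Journal research article
--     ]
--
--     if article_type:
--         # Some article types are concatenated strings, joined by "; "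
--         type_list = [s.strip() for s in article_type.split("; ")]
--
--         for compare_list, cat_code in first_pass:
--             for art_type in type_list:
--                 if art_type in compare_list:
--                     return cat_code
--
--         for compare_list, cat_code in second_pass:
--             for art_type in type_list:
--                 if art_type.lower() in compare_list:
--                     return cat_code
--     return default
-- ===== SOURCE B (Python) =====
-- # Alternative re-implementation: precompute two hash maps (exact token -> (rank, code),
-- # lowercased token -> (rank, code)) once, then a SINGLE pass over the tokens tracking the
-- # minimum rank, instead of the nested category-by-category scan.
--
-- _FIRST_PASS = [
--     (["research-article", "abstract", "clinical trial", "methods-article", "journal-article"], "JAR"),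
--     (["review", "review-article", "systematic-review", "systematic review", "product-review"], "JAV"),
--     (["data-paper"], "JAD"),
--     (["correction", "erratum", "retraction", "published erratum", "retraction of publication",
--       "corrected and republished article"], "JAC"),
--     (["article-commentary"], "VC"),
--     (["brief-report", "case reports", "case-study"], "RR"),
--     (["letter", "Letter", "reply"], "JL"),
--     (["editorial", "Editorial"], "JE"),
--     (["meeting-report"], "RM"),
--     (["clinical trial protocol"], "RL"),
--     (["practice-and-policy", "practice guideline"], "RO"),
--     (["preprint", "article-preprint"], "P"),
--     (["monograph"], "B"),
--     (["book-chapter"], "BC"),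
--     (["book-review"], "VB"),
--     (["report"], "R"),
--     (["technical-note"], "RT"),
--     (["proceedings"], "CP"),
--     (["clinical conference"], "C"),
-- ]
-- _SECOND_PASS = [
--     (["case-report"], "RR"),
--     (["journal article", "article"], "JAR"),
-- ]
--
-- _FIRST_MAP = {}
-- for _rank, (_names, _code) in enumerate(_FIRST_PASS):
--     for _n in _names:
--         _FIRST_MAP[_n] = (_rank, _code)
-- _SECOND_MAP = {}
-- for _rank, (_names, _code) in enumerate(_SECOND_PASS):
--     for _n in _names:
--         _SECOND_MAP[_n] = (len(_FIRST_PASS) + _rank, _code)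
--
--
-- def calc_cat_from_compound_article_type(article_type, default="O"):
--     if not article_type:
--         return default
--     best = None
--     for s in article_type.split("; "):
--         t = s.strip()
--         for cand in (_FIRST_MAP.get(t), _SECOND_MAP.get(t.lower())):
--             if cand is not None and (best is None or cand[0] < best[0]):
--                 best = cand
--     return best[1] if best is not None else default
-- ===== Notes on version B (the rewrite author's own statement) =====
-- stated objective: alternative
-- what changed: Replaces the nested category-by-category scan over the token list with two precomputed token-to-(priority rank, code) maps (exact token, lowercased token) and a single pass over the tokens tracking the minimum rank.
import Mathlib
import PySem

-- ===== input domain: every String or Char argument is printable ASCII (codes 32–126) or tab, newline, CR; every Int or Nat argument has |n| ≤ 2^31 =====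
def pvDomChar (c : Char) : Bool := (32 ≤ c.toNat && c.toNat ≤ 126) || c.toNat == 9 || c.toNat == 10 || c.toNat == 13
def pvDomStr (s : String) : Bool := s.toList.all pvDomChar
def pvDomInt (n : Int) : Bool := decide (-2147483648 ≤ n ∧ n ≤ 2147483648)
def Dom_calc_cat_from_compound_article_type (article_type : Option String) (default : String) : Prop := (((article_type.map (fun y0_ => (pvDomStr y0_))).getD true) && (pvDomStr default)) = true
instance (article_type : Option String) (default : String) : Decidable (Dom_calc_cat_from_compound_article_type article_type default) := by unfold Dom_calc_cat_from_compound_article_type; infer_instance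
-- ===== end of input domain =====

-- B replaces A's nested category-by-category scan with two precomputed token→(rank, code) maps
-- and a single minimum-rank pass over the tokens (objective: alternative single-pass algorithm).

-- ===== PORT A =====
def pvFirstPass : List (List String × String) := [
  (["research-article", "abstract", "clinical trial", "methods-article", "journal-article"], "JAR"),
  (["review", "review-article", "systematic-review", "systematic review", "product-review"], "JAV"),
  (["data-paper"], "JAD"),
  (["correction", "erratum", "retraction", "published erratum", "retraction of publication", "corrected and republished article"], "JAC"),
  (["article-commentary"], "VC"),
  (["brief-report", "case reports", "case-study"], "RR"),
  (["letter", "Letter", "reply"], "JL"),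
  (["editorial", "Editorial"], "JE"),
  (["meeting-report"], "RM"),
  (["clinical trial protocol"], "RL"),
  (["practice-and-policy", "practice guideline"], "RO"),
  (["preprint", "article-preprint"], "P"),
  (["monograph"], "B"),
  (["book-chapter"], "BC"),
  (["book-review"], "VB"),
  (["report"], "R"),
  (["technical-note"], "RT"),
  (["proceedings"], "CP"),
  (["clinical conference"], "C")
]

def pvSecondPass : List (List String × String) := [
  (["case-report"], "RR"),
  (["journal article", "article"], "JAR")
]

-- for compare_list, cat_code in first_pass: for art_type in type_list: if art_type in compare_list: return cat_code
def pvLoop1 : List (List String × String) → List String → Option String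
  | [], _ => none
  | (cl, code) :: rest, ts => if ts.any (fun t => cl.contains t) then some code else pvLoop1 rest ts

-- the second loop: 'if art_type.lower() in compare_list'
def pvLoop2 : List (List String × String) → List String → Option String
  | [], _ => none
  | (cl, code) :: rest, ts =>
      if ts.any (fun t => cl.contains (PySem.Str.lower t)) then some code else pvLoop2 rest ts

def calc_cat_from_compound_article_type (article_type : Option String) (default : String) : String :=
  match article_type with
  | none => default
  | some s =>
    if s = "" then default   -- 'if article_type:' — empty string is falsy
    else
      -- type_list = [s.strip() for s in article_type.split("; ")]; split? is some since the separator "; " ≠ ""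
      let ts := ((PySem.Str.split? s "; ").getD []).map PySem.Str.strip
      match pvLoop1 pvFirstPass ts with
      | some c => c
      | none =>
        match pvLoop2 pvSecondPass ts with
        | some c => c
        | none => default

-- ===== PORT B =====
-- _FIRST_MAP / _SECOND_MAP: dicts with distinct literal keys, ported as their association lists
def pvFirstMap : List (String × (Nat × String)) := [
  ("research-article", (0, "JAR")),
  ("abstract", (0, "JAR")),
  ("clinical trial", (0, "JAR")),
  ("methods-article", (0, "JAR")),
  ("journal-article", (0, "JAR")),
  ("review", (1, "JAV")),
  ("review-article", (1, "JAV")),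
  ("systematic-review", (1, "JAV")),
  ("systematic review", (1, "JAV")),
  ("product-review", (1, "JAV")),
  ("data-paper", (2, "JAD")),
  ("correction", (3, "JAC")),
  ("erratum", (3, "JAC")),
  ("retraction", (3, "JAC")),
  ("published erratum", (3, "JAC")),
  ("retraction of publication", (3, "JAC")),
  ("corrected and republished article", (3, "JAC")),
  ("article-commentary", (4, "VC")),
  ("brief-report", (5, "RR")),
  ("case reports", (5, "RR")),
  ("case-study", (5, "RR")),
  ("letter", (6, "JL")),
  ("Letter", (6, "JL")),
  ("reply", (6, "JL")),
  ("editorial", (7, "JE")),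
  ("Editorial", (7, "JE")),
  ("meeting-report", (8, "RM")),
  ("clinical trial protocol", (9, "RL")),
  ("practice-and-policy", (10, "RO")),
  ("practice guideline", (10, "RO")),
  ("preprint", (11, "P")),
  ("article-preprint", (11, "P")),
  ("monograph", (12, "B")),
  ("book-chapter", (13, "BC")),
  ("book-review", (14, "VB")),
  ("report", (15, "R")),
  ("technical-note", (16, "RT")),
  ("proceedings", (17, "CP")),
  ("clinical conference", (18, "C"))
]

def pvSecondMap : List (String × (Nat × String)) := [
  ("case-report", (19, "RR")),
  ("journal article", (20, "JAR")),
  ("article", (20, "JAR"))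
]

-- 'if cand is not None and (best is None or cand[0] < best[0]): best = cand'
def pvTakeBest : Option (Nat × String) → Option (Nat × String) → Option (Nat × String)
  | best, none => best
  | none, some c => some c
  | some b, some c => if c.1 < b.1 then some c else some b

def calc_cat_from_compound_article_type_alt (article_type : Option String) (default : String) : String :=
  match article_type with
  | none => default
  | some s =>
    if s = "" then default
    else
      let ts := ((PySem.Str.split? s "; ").getD []).map PySem.Str.strip
      let best := ts.foldl
        (fun best t =>
          pvTakeBest (pvTakeBest best (pvFirstMap.lookup t))
                     (pvSecondMap.lookup (PySem.Str.lower t))) none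
      match best with
      | some (_, c) => c
      | none => default

-- ===== PRECONDITION & SPEC =====
def Spec_calc_cat_from_compound_article_type (article_type : Option String) (default : String) (out : String) : Prop := out = calc_cat_from_compound_article_type_alt article_type default
instance (article_type : Option String) (default : String) (out : String) : Decidable (Spec_calc_cat_from_compound_article_type article_type default out) := by unfold Spec_calc_cat_from_compound_article_type; infer_instance

-- ===== CLAIM (what is proved, stated in full; the proofs are below) =====
def Claim_equal_calc_cat_from_compound_article_type : Prop := ∀ (article_type : Option String) (default : String), Dom_calc_cat_from_compound_article_type article_type default → Spec_calc_cat_from_compound_article_type article_type default (calc_cat_from_compound_article_type article_type default)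

-- ===== LEMMAS AND PROOFS =====

-- ranked first-hit scan over a table of predicates: the common reference both ports are reduced to
def pvShiftK (k : Nat) (x : Option (Nat × String)) : Option (Nat × String) :=
  x.map (fun p => (p.1 + k, p.2))

def pvScan : List ((String → Bool) × String) → List String → Option (Nat × String)
  | [], _ => none
  | (p, c) :: rest, ts => if ts.any p then some (0, c) else pvShiftK 1 (pvScan rest ts)

def pvRawTbl (tb : List (List String × String)) : List ((String → Bool) × String) :=
  tb.map (fun r => ((fun t => r.1.contains t), r.2))

def pvLowTbl (tb : List (List String × String)) : List ((String → Bool) × String) :=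
  tb.map (fun r => ((fun t => r.1.contains (PySem.Str.lower t)), r.2))

def pvTbl : List ((String → Bool) × String) := pvRawTbl pvFirstPass ++ pvLowTbl pvSecondPass

theorem pvTakeBest_none_left (c : Option (Nat × String)) : pvTakeBest none c = c := by
  cases c <;> rfl

theorem pvTakeBest_assoc (a b c : Option (Nat × String)) :
    pvTakeBest (pvTakeBest a b) c = pvTakeBest a (pvTakeBest b c) := by
  rcases a with _ | ⟨i, x⟩ <;> rcases b with _ | ⟨j, y⟩ <;> rcases c with _ | ⟨k, z⟩ <;>
    simp only [pvTakeBest] <;> split_ifs <;> simp only [pvTakeBest] <;> split_ifs <;>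
      first | rfl | (exfalso; omega)

theorem pvShiftK_takeBest (k : Nat) (a b : Option (Nat × String)) :
    pvShiftK k (pvTakeBest a b) = pvTakeBest (pvShiftK k a) (pvShiftK k b) := by
  rcases a with _ | ⟨i, x⟩ <;> rcases b with _ | ⟨j, y⟩ <;>
    simp only [pvTakeBest, pvShiftK, Option.map] <;> split_ifs <;>
      simp only [pvTakeBest, pvShiftK, Option.map] <;> (try split_ifs) <;>
      first | rfl | (exfalso; omega)

theorem pvShiftK_shiftK (k m : Nat) (x : Option (Nat × String)) :
    pvShiftK k (pvShiftK m x) = pvShiftK (m + k) x := by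
  rcases x with _ | ⟨i, c⟩ <;> simp [pvShiftK, Nat.add_assoc]

theorem pvScan_nil (tbl : List ((String → Bool) × String)) : pvScan tbl [] = none := by
  induction tbl with
  | nil => rfl
  | cons r rest ih => simp [pvScan, ih, pvShiftK]

theorem pvScan_append (xs ys : List ((String → Bool) × String)) (ts : List String) :
    pvScan (xs ++ ys) ts = pvTakeBest (pvScan xs ts) (pvShiftK xs.length (pvScan ys ts)) := by
  induction xs with
  | nil =>
    simp only [List.nil_append, pvScan, pvTakeBest_none_left, List.length_nil]
    rcases h : pvScan ys ts with _ | ⟨i, c⟩ <;> simp [pvShiftK]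
  | cons r rest ih =>
    obtain ⟨p, c⟩ := r
    simp only [List.cons_append, pvScan, List.length_cons]
    by_cases h : ts.any p = true
    · simp only [h, if_pos]
      rcases hy : pvScan ys ts with _ | ⟨j, d⟩ <;> simp [pvTakeBest, pvShiftK]
    · simp only [h, if_neg, Bool.not_eq_true] at *
      simp only [h, Bool.false_eq_true, if_neg, not_false_iff, ih, pvShiftK_takeBest,
        pvShiftK_shiftK]

theorem pvScan_cons (tbl : List ((String → Bool) × String)) (t : String) (ts : List String) :
    pvScan tbl (t :: ts) = pvTakeBest (pvScan tbl [t]) (pvScan tbl ts) := by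
  induction tbl with
  | nil => rfl
  | cons r rest ih =>
    obtain ⟨p, c⟩ := r
    simp only [pvScan, List.any_cons, List.any_nil, Bool.or_false]
    by_cases h1 : p t = true
    · simp only [h1, Bool.true_or, if_pos]
      by_cases h2 : ts.any p = true <;>
        simp only [h2, Bool.false_eq_true, if_pos, if_neg, not_false_iff] <;>
          rcases pvScan rest ts with _ | ⟨j, d⟩ <;> simp [pvShiftK, pvTakeBest]
    · simp only [h1, Bool.false_eq_true, if_neg, not_false_iff, Bool.false_or]
      by_cases h2 : ts.any p = true
      · simp only [h2, if_pos]
        rcases pvScan rest [t] with _ | ⟨j, d⟩ <;> simp [pvShiftK, pvTakeBest]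
      · simp only [h2, Bool.false_eq_true, if_neg, not_false_iff, ih, pvShiftK_takeBest]

theorem pvScan_lt (tbl : List ((String → Bool) × String)) (ts : List String) (p : Nat × String)
    (h : pvScan tbl ts = some p) : p.1 < tbl.length := by
  induction tbl generalizing p with
  | nil => simp [pvScan] at h
  | cons r rest ih =>
    obtain ⟨q, c⟩ := r
    simp only [pvScan] at h
    split at h
    · cases h; simp
    · rcases hr : pvScan rest ts with _ | ⟨j, d⟩ <;> simp [hr, pvShiftK] at h
      rcases h with ⟨h1, h2⟩
      have := ih (j, d) hr
      simp only [List.length_cons]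
      omega

-- A's first loop equals map-snd of the ranked scan over the raw table
theorem pvLoop1_eq (tb : List (List String × String)) (ts : List String) :
    pvLoop1 tb ts = (pvScan (pvRawTbl tb) ts).map Prod.snd := by
  induction tb with
  | nil => rfl
  | cons r rest ih =>
    obtain ⟨cl, c⟩ := r
    simp only [pvLoop1, pvRawTbl, List.map_cons, pvScan]
    split
    · rfl
    · rw [ih]
      rcases hr : pvScan (pvRawTbl rest) ts with _ | ⟨j, d⟩ <;> simp [pvRawTbl] at hr <;>
        simp [hr, pvShiftK, pvRawTbl]

theorem pvLoop2_eq (tb : List (List String × String)) (ts : List String) :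
    pvLoop2 tb ts = (pvScan (pvLowTbl tb) ts).map Prod.snd := by
  induction tb with
  | nil => rfl
  | cons r rest ih =>
    obtain ⟨cl, c⟩ := r
    simp only [pvLoop2, pvLowTbl, List.map_cons, pvScan]
    split
    · rfl
    · rw [ih]
      rcases hr : pvScan (pvLowTbl rest) ts with _ | ⟨j, d⟩ <;> simp [pvLowTbl] at hr <;>
        simp [hr, pvShiftK, pvLowTbl]

-- per-token: B's first-map lookup is the ranked scan of A's first table on the single token
set_option maxRecDepth 8192 in
theorem pvFirstMap_eq_scan (t : String) :
    pvFirstMap.lookup t = pvScan (pvRawTbl pvFirstPass) [t] := by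
  by_cases h0 : t = "research-article"
  · subst h0; decide
  by_cases h1 : t = "abstract"
  · subst h1; decide
  by_cases h2 : t = "clinical trial"
  · subst h2; decide
  by_cases h3 : t = "methods-article"
  · subst h3; decide
  by_cases h4 : t = "journal-article"
  · subst h4; decide
  by_cases h5 : t = "review"
  · subst h5; decide
  by_cases h6 : t = "review-article"
  · subst h6; decide
  by_cases h7 : t = "systematic-review"
  · subst h7; decide
  by_cases h8 : t = "systematic review"
  · subst h8; decide
  by_cases h9 : t = "product-review"
  · subst h9; decide
  by_cases h10 : t = "data-paper"
  · subst h10; decide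
  by_cases h11 : t = "correction"
  · subst h11; decide
  by_cases h12 : t = "erratum"
  · subst h12; decide
  by_cases h13 : t = "retraction"
  · subst h13; decide
  by_cases h14 : t = "published erratum"
  · subst h14; decide
  by_cases h15 : t = "retraction of publication"
  · subst h15; decide
  by_cases h16 : t = "corrected and republished article"
  · subst h16; decide
  by_cases h17 : t = "article-commentary"
  · subst h17; decide
  by_cases h18 : t = "brief-report"
  · subst h18; decide
  by_cases h19 : t = "case reports"
  · subst h19; decide
  by_cases h20 : t = "case-study"
  · subst h20; decide
  by_cases h21 : t = "letter"
  · subst h21; decide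
  by_cases h22 : t = "Letter"
  · subst h22; decide
  by_cases h23 : t = "reply"
  · subst h23; decide
  by_cases h24 : t = "editorial"
  · subst h24; decide
  by_cases h25 : t = "Editorial"
  · subst h25; decide
  by_cases h26 : t = "meeting-report"
  · subst h26; decide
  by_cases h27 : t = "clinical trial protocol"
  · subst h27; decide
  by_cases h28 : t = "practice-and-policy"
  · subst h28; decide
  by_cases h29 : t = "practice guideline"
  · subst h29; decide
  by_cases h30 : t = "preprint"
  · subst h30; decide
  by_cases h31 : t = "article-preprint"
  · subst h31; decide
  by_cases h32 : t = "monograph"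
  · subst h32; decide
  by_cases h33 : t = "book-chapter"
  · subst h33; decide
  by_cases h34 : t = "book-review"
  · subst h34; decide
  by_cases h35 : t = "report"
  · subst h35; decide
  by_cases h36 : t = "technical-note"
  · subst h36; decide
  by_cases h37 : t = "proceedings"
  · subst h37; decide
  by_cases h38 : t = "clinical conference"
  · subst h38; decide
  have hall : pvFirstMap.lookup t = none := by
    simp only [pvFirstMap, List.lookup, beq_eq_false_iff_ne.mpr h0, beq_eq_false_iff_ne.mpr h1, beq_eq_false_iff_ne.mpr h2, beq_eq_false_iff_ne.mpr h3, beq_eq_false_iff_ne.mpr h4, beq_eq_false_iff_ne.mpr h5, beq_eq_false_iff_ne.mpr h6, beq_eq_false_iff_ne.mpr h7, beq_eq_false_iff_ne.mpr h8, beq_eq_false_iff_ne.mpr h9, beq_eq_false_iff_ne.mpr h10, beq_eq_false_iff_ne.mpr h11, beq_eq_false_iff_ne.mpr h12, beq_eq_false_iff_ne.mpr h13, beq_eq_false_iff_ne.mpr h14, beq_eq_false_iff_ne.mpr h15, beq_eq_false_iff_ne.mpr h16, beq_eq_false_iff_ne.mpr h17, beq_eq_false_iff_ne.mpr h18, beq_eq_false_iff_ne.mpr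 h19, beq_eq_false_iff_ne.mpr h20, beq_eq_false_iff_ne.mpr h21, beq_eq_false_iff_ne.mpr h22, beq_eq_false_iff_ne.mpr h23, beq_eq_false_iff_ne.mpr h24, beq_eq_false_iff_ne.mpr h25, beq_eq_false_iff_ne.mpr h26, beq_eq_false_iff_ne.mpr h27, beq_eq_false_iff_ne.mpr h28, beq_eq_false_iff_ne.mpr h29, beq_eq_false_iff_ne.mpr h30, beq_eq_false_iff_ne.mpr h31, beq_eq_false_iff_ne.mpr h32, beq_eq_false_iff_ne.mpr h33, beq_eq_false_iff_ne.mpr h34, beq_eq_false_iff_ne.mpr h35, beq_eq_false_iff_ne.mpr h36, beq_eq_false_iff_ne.mpr h37, beq_eq_false_iff_ne.mpr h38]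
  have hscan : pvScan (pvRawTbl pvFirstPass) [t] = none := by
    simp only [pvRawTbl, pvFirstPass, List.map, pvScan, List.any_cons, List.any_nil,
      Bool.or_false, List.contains, List.elem, beq_eq_false_iff_ne.mpr h0, beq_eq_false_iff_ne.mpr h1, beq_eq_false_iff_ne.mpr h2, beq_eq_false_iff_ne.mpr h3, beq_eq_false_iff_ne.mpr h4, beq_eq_false_iff_ne.mpr h5, beq_eq_false_iff_ne.mpr h6, beq_eq_false_iff_ne.mpr h7, beq_eq_false_iff_ne.mpr h8, beq_eq_false_iff_ne.mpr h9, beq_eq_false_iff_ne.mpr h10, beq_eq_false_iff_ne.mpr h11, beq_eq_false_iff_ne.mpr h12, beq_eq_false_iff_ne.mpr h13, beq_eq_false_iff_ne.mpr h14, beq_eq_false_iff_ne.mpr h15, beq_eq_false_iff_ne.mpr h16, beq_eq_false_iff_ne.mpr h17, beq_eq_false_iff_ne.mpr h18, beq_eq_false_iff_ne.mpr h19, beq_eq_false_iff_ne.mpr h20, beq_eq_false_iff_ne.mpr h21, beq_eq_false_iff_ne.mpr h22, beq_eq_false_iff_ne.mpr h23, beq_eq_false_iff_ne.mpr h24, beq_eq_false_iff_ne.mpr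 h25, beq_eq_false_iff_ne.mpr h26, beq_eq_false_iff_ne.mpr h27, beq_eq_false_iff_ne.mpr h28, beq_eq_false_iff_ne.mpr h29, beq_eq_false_iff_ne.mpr h30, beq_eq_false_iff_ne.mpr h31, beq_eq_false_iff_ne.mpr h32, beq_eq_false_iff_ne.mpr h33, beq_eq_false_iff_ne.mpr h34, beq_eq_false_iff_ne.mpr h35, beq_eq_false_iff_ne.mpr h36, beq_eq_false_iff_ne.mpr h37, beq_eq_false_iff_ne.mpr h38, Bool.false_or, Bool.or_false,
      Bool.false_eq_true, if_false, pvShiftK, Option.map]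
  rw [hall, hscan]

-- per-token: B's second-map lookup (on any string u) is the shifted ranked scan of A's second table
set_option maxRecDepth 8192 in
theorem pvSecondMap_eq_scan (u : String) :
    pvSecondMap.lookup u =
      pvShiftK pvFirstPass.length
        (pvScan (pvRawTbl pvSecondPass) [u]) := by
  by_cases h0 : u = "case-report"
  · subst h0; decide
  by_cases h1 : u = "journal article"
  · subst h1; decide
  by_cases h2 : u = "article"
  · subst h2; decide
  have hall : pvSecondMap.lookup u = none := by
    simp only [pvSecondMap, List.lookup, beq_eq_false_iff_ne.mpr h0, beq_eq_false_iff_ne.mpr h1, beq_eq_false_iff_ne.mpr h2]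
  have hscan : pvScan (pvRawTbl pvSecondPass) [u] = none := by
    simp only [pvRawTbl, pvSecondPass, List.map, pvScan, List.any_cons, List.any_nil,
      Bool.or_false, List.contains, List.elem, beq_eq_false_iff_ne.mpr h0, beq_eq_false_iff_ne.mpr h1, beq_eq_false_iff_ne.mpr h2, Bool.false_or, Bool.or_false,
      Bool.false_eq_true, if_false, pvShiftK, Option.map]
  rw [hall, hscan]; rfl

-- the lowered table on [t] is the raw table on [lower t]
theorem pvLowTbl_single (tb : List (List String × String)) (t : String) :
    pvScan (pvLowTbl tb) [t] = pvScan (pvRawTbl tb) [PySem.Str.lower t] := by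
  induction tb with
  | nil => rfl
  | cons r rest ih =>
    obtain ⟨cl, c⟩ := r
    simp only [pvLowTbl, pvRawTbl, List.map_cons, pvScan, List.any_cons, List.any_nil,
      Bool.or_false] at *
    rw [ih]

-- per-token combination: one step of B's fold adds exactly pvScan pvTbl [t]
theorem pvToken_eq (t : String) :
    pvTakeBest (pvFirstMap.lookup t) (pvSecondMap.lookup (PySem.Str.lower t)) =
      pvScan pvTbl [t] := by
  rw [pvFirstMap_eq_scan, pvSecondMap_eq_scan, pvTbl, pvScan_append]
  have : (pvRawTbl pvFirstPass).length = pvFirstPass.length := by simp [pvRawTbl]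
  rw [this, pvLowTbl_single]

-- B's fold computes the ranked scan of the whole table
theorem pvFold_eq (ts : List String) (acc : Option (Nat × String)) :
    ts.foldl
        (fun best t =>
          pvTakeBest (pvTakeBest best (pvFirstMap.lookup t))
                     (pvSecondMap.lookup (PySem.Str.lower t))) acc
      = pvTakeBest acc (pvScan pvTbl ts) := by
  induction ts generalizing acc with
  | nil => simp [List.foldl, pvScan_nil, pvTakeBest]
  | cons t ts ih =>
    simp only [List.foldl]
    rw [ih, pvScan_cons, ← pvToken_eq]
    simp only [pvTakeBest_assoc]

-- the two passes chained equal map-snd of the combined ranked scan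
theorem pvLoops_eq (ts : List String) :
    (match pvLoop1 pvFirstPass ts with
     | some c => some c
     | none => pvLoop2 pvSecondPass ts)
      = (pvScan pvTbl ts).map Prod.snd := by
  rw [pvLoop1_eq, pvLoop2_eq, pvTbl, pvScan_append]
  have hlen : (pvRawTbl pvFirstPass).length = 19 := by rfl
  rcases h1 : pvScan (pvRawTbl pvFirstPass) ts with _ | ⟨i, c⟩
  · rcases h2 : pvScan (pvLowTbl pvSecondPass) ts with _ | ⟨j, d⟩ <;>
      simp [pvTakeBest, pvShiftK, hlen]
  · have hi : i < 19 := by have := pvScan_lt _ _ _ h1; omega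
    rcases h2 : pvScan (pvLowTbl pvSecondPass) ts with _ | ⟨j, d⟩
    · simp [pvTakeBest, pvShiftK, hlen]
    · have hni : ¬ (j + 19 < i) := by omega
      simp [pvTakeBest, pvShiftK, hlen, hni]

-- ===== VERDICT (by name: the statement is the Claim_ definition above) =====
theorem calc_cat_from_compound_article_type_spec : Claim_equal_calc_cat_from_compound_article_type := by
  intro article_type default _
  unfold Spec_calc_cat_from_compound_article_type
  unfold calc_cat_from_compound_article_type calc_cat_from_compound_article_type_alt
  rcases article_type with _ | s
  · rfl
  · simp only
    by_cases hs : s = ""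
    · simp [hs]
    · simp only [hs, if_neg, not_false_iff]
      rw [pvFold_eq _ none, pvTakeBest_none_left]
      have h := pvLoops_eq (((PySem.Str.split? s "; ").getD []).map PySem.Str.strip)
      rcases hsc : pvScan pvTbl (((PySem.Str.split? s "; ").getD []).map PySem.Str.strip)
        with _ | ⟨j, d⟩ <;> rw [hsc] at h <;>
        rcases h1 : pvLoop1 pvFirstPass (((PySem.Str.split? s "; ").getD []).map PySem.Str.strip)
          with _ | c <;> rw [h1] at h <;>
        rcases h2 : pvLoop2 pvSecondPass (((PySem.Str.split? s "; ").getD []).map PySem.Str.strip)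
          with _ | c' <;> rw [h2] at h <;> simp_all
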